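-- pv_equiv track=rewrite | github.com/morening/LearnML | fp_growth/practice0313_mushroom.py | convert_datas
-- ===== SOURCE A (Python) =====
-- def convert_datas(dataset):
--     convert_list = []
--     values = dataset[0].split(',')
--     N = len(values)
--     count = 0
--     for index in range(N):
--         M = {}
--         for ds in dataset:
--             values = ds.split(',')
--             if values[index] not in M:
--                 M[values[index]] = count
--                 count += 1
--         convert_list.append(M)
--
--     datas = []
--     for ds in dataset:
--         values = ds.split(',')
--         data = []
--         for index in range(len(values)):
--             value = convert_list[index][values[index]]
--             data.append(str(value))
--         datas.append(data)
--
--     return datas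
-- ===== SOURCE B (Python) =====
-- def convert_datas(dataset):
--     rows = [ds.split(',') for ds in dataset]
--     n = len(rows[0])
--     count = 0
--     cols = []
--     for j in range(n):
--         m = {}
--         col = []
--         for row in rows:
--             v = row[j]
--             if v not in m:
--                 m[v] = count
--                 count += 1
--             col.append(str(m[v]))
--         cols.append(col)
--     return [list(t) for t in zip(*cols)]
-- ===== Notes on version B (the rewrite author's own statement) =====
-- stated objective: alternative
-- what changed: B splits every row once into a token matrix and does one fused column-wise pass that both assigns ids (same shared running counter, column-major first-appearance order) and emits the encoded column, then transposes the columns back into rows, instead of A's two separate phases (build per-column maps over re-split rows, then encode each row).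
import Mathlib
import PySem

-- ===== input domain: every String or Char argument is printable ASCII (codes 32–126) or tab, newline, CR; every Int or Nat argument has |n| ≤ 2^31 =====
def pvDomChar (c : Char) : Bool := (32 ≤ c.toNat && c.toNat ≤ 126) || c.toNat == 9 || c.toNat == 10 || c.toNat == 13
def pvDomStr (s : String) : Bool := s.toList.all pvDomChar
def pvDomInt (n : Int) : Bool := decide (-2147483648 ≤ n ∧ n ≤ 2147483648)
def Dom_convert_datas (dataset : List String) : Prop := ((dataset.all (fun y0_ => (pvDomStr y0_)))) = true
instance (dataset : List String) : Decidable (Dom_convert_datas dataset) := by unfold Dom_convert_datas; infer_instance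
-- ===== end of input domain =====

-- B fuses A's two phases into one column-wise pass (split each row once, encode while assigning ids)
-- followed by a transpose; same values everywhere A returns (objective: alternative decomposition).

-- s.split(',') — ',' is nonempty so Python's split never fails; split? returns some here
def pySplit (s : String) : List String := (PySem.Str.split? s ",").getD []

-- ===== PORT A =====
def convert_datas (dataset : List String) : List (List String) :=
  -- values = dataset[0].split(','); N = len(values)  (dataset[0] raises on []; Pre_ excludes)
  let values0 := pySplit (dataset.headD "")
  let N := values0.length
  -- first phase: build convert_list (one dict per column) threading the shared count
  let st := (List.range N).foldl
    (fun (st : List (PySem.Dict String Int) × Int) index =>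
      let p := dataset.foldl
        (fun (p : PySem.Dict String Int × Int) ds =>
          let values := pySplit ds
          let v := (values[index]?).getD ""   -- values[index] raises if out of range; Pre_ excludes
          if p.1.contains v then p else (p.1.insert v p.2, p.2 + 1))
        (PySem.Dict.empty, st.2)
      (st.1 ++ [p.1], p.2))
    ([], 0)
  let convert_list := st.1
  -- second phase: encode each row with its own length
  dataset.foldl
    (fun datas ds =>
      let values := pySplit ds
      let data := (List.range values.length).foldl
        (fun data index =>
          let M := (convert_list[index]?).getD PySem.Dict.empty  -- raises if index ≥ N; Pre_ excludes
          data ++ [PySem.Int.toStr (M.getD ((values[index]?).getD "") 0)])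
        []
      datas ++ [data])
    []

-- ===== PORT B =====
-- zip(*cols) followed by list(...) on each tuple: rows of min length
def pyZipT (cols : List (List String)) : List (List String) :=
  match cols with
  | [] => []
  | c :: _ =>
    (List.range (cols.foldl (fun m col => min m col.length) c.length)).map
      (fun i => cols.map (fun col => (col[i]?).getD ""))

def convert_datas_alt (dataset : List String) : List (List String) :=
  let rows := dataset.map pySplit
  let n := (rows.headD []).length
  let st := (List.range n).foldl
    (fun (st : List (List String) × Int) j =>
      let q := rows.foldl
        (fun (q : PySem.Dict String Int × List String × Int) row =>
          let v := (row[j]?).getD ""   -- row[j] raises if out of range; Pre_ excludes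
          let mq := if q.1.contains v then (q.1, q.2.2) else (q.1.insert v q.2.2, q.2.2 + 1)
          (mq.1, q.2.1 ++ [PySem.Int.toStr (mq.1.getD v 0)], mq.2))
        (PySem.Dict.empty, [], st.2)
      (st.1 ++ [q.2.1], q.2.2))
    ([], 0)
  pyZipT st.1

-- ===== PRECONDITION & SPEC =====
-- Pre_ excludes exactly the inputs where A raises: the empty dataset (IndexError on dataset[0])
-- and ragged datasets where some row splits into a different number of tokens than row 0
-- (IndexError while building a column map or while indexing convert_list).
def Pre_convert_datas (dataset : List String) : Prop :=
  dataset ≠ [] ∧ ∀ ds ∈ dataset, (pySplit ds).length = (pySplit (dataset.headD "")).length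

instance (dataset : List String) : Decidable (Pre_convert_datas dataset) := by
  unfold Pre_convert_datas; infer_instance

def pvWitness_convert_datas : List String := ["a,b,a", "c,b,a"]

def Spec_convert_datas (dataset : List String) (out : List (List String)) : Prop := out = convert_datas_alt dataset
instance (dataset : List String) (out : List (List String)) : Decidable (Spec_convert_datas dataset out) := by unfold Spec_convert_datas; infer_instance

-- ===== CLAIM (what is proved, stated in full; the proofs are below) =====
def Claim_equal_convert_datas : Prop := ∀ (dataset : List String), Dom_convert_datas dataset → Pre_convert_datas dataset → Spec_convert_datas dataset (convert_datas dataset)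

-- ===== LEMMAS AND PROOFS =====

-- A's inner (map-building) fold over the rows of one column
def innerA (rows : List (List String)) (j : Nat) (p : PySem.Dict String Int × Int) :
    PySem.Dict String Int × Int :=
  rows.foldl
    (fun p row =>
      let v := (row[j]?).getD ""
      if p.1.contains v then p else (p.1.insert v p.2, p.2 + 1)) p

-- B's inner fold over the rows of one column
def innerB (rows : List (List String)) (j : Nat)
    (q : PySem.Dict String Int × List String × Int) :
    PySem.Dict String Int × List String × Int :=
  rows.foldl
    (fun q row =>
      let v := (row[j]?).getD ""
      let mq := if q.1.contains v then (q.1, q.2.2) else (q.1.insert v q.2.2, q.2.2 + 1)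
      (mq.1, q.2.1 ++ [PySem.Int.toStr (mq.1.getD v 0)], mq.2)) q

-- both phases packaged: per column the final dict, the encoded column, threading the count
def pack (rows : List (List String)) : List Nat → Int → List (PySem.Dict String Int × List String) × Int
  | [], c => ([], c)
  | j :: t, c =>
    let p := innerA rows j (PySem.Dict.empty, c)
    let col := rows.map (fun row => PySem.Int.toStr (p.1.getD ((row[j]?).getD "") 0))
    let r := pack rows t p.2
    ((p.1, col) :: r.1, r.2)

theorem pack_length (rows : List (List String)) (l : List Nat) (c : Int) :
    (pack rows l c).1.length = l.length := by
  induction l generalizing c with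
  | nil => rfl
  | cons j t ih => simp [pack, ih]

theorem innerA_getD_stable (rows : List (List String)) (j : Nat)
    (p : PySem.Dict String Int × Int) (v : String) (h : p.1.contains v = true) :
    (innerA rows j p).1.getD v 0 = p.1.getD v 0 := by
  induction rows generalizing p with
  | nil => rfl
  | cons r t ih =>
    simp only [innerA, List.foldl_cons] at *
    split
    · exact ih _ h
    · next hc =>
      rw [ih _ (by simp [PySem.Dict.contains_insert, h])]
      have hne : v ≠ (r[j]?).getD "" := by
        intro he; rw [he] at h; exact absurd h (by simp [hc])
      exact PySem.Dict.getD_insert_of_ne _ _ _ hne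

theorem innerB_eq (rows : List (List String)) (j : Nat)
    (m : PySem.Dict String Int) (col : List String) (c : Int) :
    innerB rows j (m, col, c) =
      ((innerA rows j (m, c)).1,
       col ++ rows.map (fun row =>
         PySem.Int.toStr ((innerA rows j (m, c)).1.getD ((row[j]?).getD "") 0)),
       (innerA rows j (m, c)).2) := by
  induction rows generalizing m col c with
  | nil => simp [innerA, innerB]
  | cons r t ih =>
    simp only [innerB, innerA, List.foldl_cons, List.map_cons] at *
    by_cases hc : m.contains ((r[j]?).getD "") = true
    · rw [if_pos hc]
      rw [ih]
      have hst := innerA_getD_stable t j (m, c) ((r[j]?).getD "") hc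
      simp only [innerA] at hst
      simp [hst]
    · rw [if_neg hc]
      rw [ih]
      have hcon : (m.insert ((r[j]?).getD "") c).contains ((r[j]?).getD "") = true :=
        PySem.Dict.contains_insert_self _ _ _
      have hst := innerA_getD_stable t j (m.insert ((r[j]?).getD "") c, c + 1)
        ((r[j]?).getD "") hcon
      simp only [innerA] at hst
      simp [hst, PySem.Dict.getD_insert_self]

-- A's outer fold produces the dicts of pack
theorem outerA_eq (dataset : List String) (l : List Nat)
    (acc : List (PySem.Dict String Int)) (c : Int) :
    l.foldl
      (fun (st : List (PySem.Dict String Int) × Int) index =>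
        let p := dataset.foldl
          (fun (p : PySem.Dict String Int × Int) ds =>
            let values := pySplit ds
            let v := (values[index]?).getD ""
            if p.1.contains v then p else (p.1.insert v p.2, p.2 + 1))
          (PySem.Dict.empty, st.2)
        (st.1 ++ [p.1], p.2))
      (acc, c)
    = (acc ++ (pack (dataset.map pySplit) l c).1.map (·.1),
       (pack (dataset.map pySplit) l c).2) := by
  induction l generalizing acc c with
  | nil => simp [pack]
  | cons j t ih =>
    simp only [List.foldl_cons]
    have hfold : ∀ (p0 : PySem.Dict String Int × Int),
        dataset.foldl
          (fun (p : PySem.Dict String Int × Int) ds =>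
            let values := pySplit ds
            let v := (values[j]?).getD ""
            if p.1.contains v then p else (p.1.insert v p.2, p.2 + 1)) p0
        = innerA (dataset.map pySplit) j p0 := by
      intro p0; simp [innerA, List.foldl_map]
    rw [hfold, ih]
    simp [pack]

-- B's outer fold produces the columns of pack
theorem outerB_eq (rows : List (List String)) (l : List Nat)
    (acc : List (List String)) (c : Int) :
    l.foldl
      (fun (st : List (List String) × Int) j =>
        let q := innerB rows j (PySem.Dict.empty, [], st.2)
        (st.1 ++ [q.2.1], q.2.2))
      (acc, c)
    = (acc ++ (pack rows l c).1.map (·.2), (pack rows l c).2) := by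
  induction l generalizing acc c with
  | nil => simp [pack]
  | cons j t ih =>
    simp only [List.foldl_cons]
    rw [innerB_eq] at *
    simp only []
    rw [ih]
    simp [pack]

-- the j-th packed column is computed from the j-th packed dict and column index l[j]
theorem pack_elem (rows : List (List String)) (l : List Nat) (c : Int) (k : Nat)
    (hk : k < l.length) :
    ((pack rows l c).1[k]'(by rw [pack_length]; exact hk)).2 =
      rows.map (fun row =>
        PySem.Int.toStr
          ((((pack rows l c).1[k]'(by rw [pack_length]; exact hk)).1).getD
            ((row[l[k]]?).getD "") 0)) := by
  induction l generalizing c k with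
  | nil => exact absurd hk (by simp)
  | cons j t ih =>
    cases k with
    | zero => simp [pack]
    | succ k' => simpa [pack] using ih _ k' (by simpa using hk)

theorem foldl_append_map {α β : Type} (f : α → β) (l : List α) (acc : List β) :
    l.foldl (fun a i => a ++ [f i]) acc = acc ++ l.map f := by
  induction l generalizing acc with
  | nil => simp
  | cons x t ih => simp [ih]

theorem splitOn_go_ne_nil (sep : List Char) :
    ∀ (fuel : Nat) (l cur : List Char) (acc : List (List Char)),
      PySem.Chars.splitOn.go sep fuel l cur acc ≠ [] := by
  intro fuel
  induction fuel with
  | zero => intro l cur acc; rw [PySem.Chars.splitOn.go.eq_def]; simp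
  | succ n ih =>
    intro l cur acc
    rw [PySem.Chars.splitOn.go.eq_def]
    cases l with
    | nil => simp
    | cons ch rest =>
      simp only []
      split
      · exact ih _ _ _
      · exact ih _ _ _

theorem pySplit_ne_nil (s : String) : pySplit s ≠ [] := by
  unfold pySplit
  simp only [PySem.Str.split?, PySem.Chars.split?.eq_def, PySem.Chars.splitOn.eq_def]
  rw [if_neg (by decide)]
  simp only [Option.map_some, Option.getD_some, ne_eq, List.map_eq_nil_iff]
  exact splitOn_go_ne_nil _ _ _ _ _

theorem foldl_min_const (L : Nat) (l : List (List String))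
    (h : ∀ x ∈ l, x.length = L) :
    l.foldl (fun m col => min m col.length) L = L := by
  induction l with
  | nil => rfl
  | cons x t ih =>
    simp only [List.foldl_cons, h x (by simp), min_self]
    exact ih (fun y hy => h y (by simp [hy]))

-- ===== VERDICT (by name: the statement is the Claim_ definition above) =====
theorem convert_datas_spec : Claim_equal_convert_datas := by
  intro dataset _hdom hpre
  obtain ⟨hne, hlen⟩ := hpre
  unfold Spec_convert_datas convert_datas convert_datas_alt
  simp only
  rw [outerA_eq]
  simp only [List.nil_append]
  rw [foldl_append_map (fun ds => (List.range (pySplit ds).length).foldl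
        (fun data index =>
          data ++ [PySem.Int.toStr
            (((((pack (dataset.map pySplit) (List.range (pySplit (dataset.headD "")).length) 0).1.map (·.1))[index]?).getD PySem.Dict.empty).getD
              (((pySplit ds)[index]?).getD "") 0)]) [])]
  change _ = pyZipT (List.foldl (fun (st : List (List String) × Int) (j : Nat) =>
      (st.1 ++ [(innerB (List.map pySplit dataset) j (PySem.Dict.empty, [], st.2)).2.1],
       (innerB (List.map pySplit dataset) j (PySem.Dict.empty, [], st.2)).2.2)) ([], 0)
      (List.range ((List.map pySplit dataset).headD []).length)).1
  rw [outerB_eq]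
  simp only [List.nil_append]
  obtain ⟨d, t, rfl⟩ : ∃ d t, dataset = d :: t := by
    cases dataset with
    | nil => exact absurd rfl hne
    | cons d t => exact ⟨d, t, rfl⟩
  have hhead : ((d :: t).map pySplit).headD [] = pySplit d := rfl
  have hhead' : (d :: t).headD "" = d := rfl
  rw [hhead, hhead']
  -- abbreviations
  have hNpos : 0 < (pySplit d).length := List.length_pos_iff.mpr (pySplit_ne_nil d)
  have hPlen : (pack ((d :: t).map pySplit) (List.range (pySplit d).length) 0).1.length
      = (pySplit d).length := by rw [pack_length, List.length_range]
  have hcol : ∀ k (hk : k < (pySplit d).length),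
      ((pack ((d :: t).map pySplit) (List.range (pySplit d).length) 0).1[k]'(by omega)).2
      = ((d :: t).map pySplit).map (fun row => PySem.Int.toStr
          ((((pack ((d :: t).map pySplit) (List.range (pySplit d).length) 0).1[k]'(by omega)).1).getD
            ((row[k]?).getD "") 0)) := by
    intro k hk
    have := pack_elem ((d :: t).map pySplit) (List.range (pySplit d).length) 0 k
      (by simpa using hk)
    simpa [List.getElem_range] using this
  -- evaluate pyZipT on the (nonempty, rectangular) columns
  have hcolsne : (pack ((d :: t).map pySplit) (List.range (pySplit d).length) 0).1.map (·.2) ≠ [] := by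
    have hl : ((pack ((d :: t).map pySplit) (List.range (pySplit d).length) 0).1.map (·.2)).length
        = (pySplit d).length := by rw [List.length_map, hPlen]
    intro h
    rw [h] at hl
    simp at hl
    omega
  obtain ⟨c0, cs, hcols⟩ : ∃ c0 cs,
      (pack ((d :: t).map pySplit) (List.range (pySplit d).length) 0).1.map (·.2) = c0 :: cs := by
    cases h : (pack ((d :: t).map pySplit) (List.range (pySplit d).length) 0).1.map (·.2) with
    | nil => exact absurd h hcolsne
    | cons c0 cs => exact ⟨c0, cs, rfl⟩
  have hcollen : ∀ x ∈ (pack ((d :: t).map pySplit) (List.range (pySplit d).length) 0).1.map (·.2),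
      x.length = ((d :: t).map pySplit).length := by
    intro x hx
    obtain ⟨p, hp, rfl⟩ := List.mem_map.mp hx
    obtain ⟨k, hk, rfl⟩ := List.mem_iff_getElem.mp hp
    rw [hcol k (by omega)]
    simp
  have hc0len : c0.length = ((d :: t).map pySplit).length := by
    apply hcollen; rw [hcols]; simp
  rw [hcols]
  unfold pyZipT
  simp only []
  rw [← hcols]
  rw [hc0len, foldl_min_const _ _ hcollen]
  -- elementwise comparison
  apply List.ext_getElem
  · simp
  intro i h1 h2
  simp only [List.length_map] at h1
  rw [List.getElem_map]
  rw [List.getElem_map, List.getElem_range]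
  -- the i-th row of A
  rw [foldl_append_map (fun index => PySem.Int.toStr
        (((((pack ((d :: t).map pySplit) (List.range (pySplit d).length) 0).1.map (·.1))[index]?).getD PySem.Dict.empty).getD
          (((pySplit ((d :: t)[i]))[index]?).getD "") 0))]
  rw [List.nil_append]
  have hleni : (pySplit ((d :: t)[i])).length = (pySplit d).length := by
    have := hlen ((d :: t)[i]) (List.getElem_mem h1)
    simpa using this
  rw [hleni]
  apply List.ext_getElem
  · simp only [List.length_map, List.length_range]
    exact hPlen.symm
  intro j hj1 hj2
  simp only [List.length_map, List.length_range] at hj1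
  simp only [List.getElem_map, List.getElem_range]
  have hmap1 : ((pack ((d :: t).map pySplit) (List.range (pySplit d).length) 0).1.map (·.1))[j]?
      = some (((pack ((d :: t).map pySplit) (List.range (pySplit d).length) 0).1[j]'(by omega)).1) := by
    rw [List.getElem?_map, List.getElem?_eq_getElem (by omega)]
    rfl
  rw [hmap1]
  rw [hcol j (by omega)]
  have hrowi : (((d :: t).map pySplit).map (fun row => PySem.Int.toStr
        ((((pack ((d :: t).map pySplit) (List.range (pySplit d).length) 0).1[j]'(by omega)).1).getD
          ((row[j]?).getD "") 0)))[i]?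
      = some (PySem.Int.toStr
        ((((pack ((d :: t).map pySplit) (List.range (pySplit d).length) 0).1[j]'(by omega)).1).getD
          (((pySplit ((d :: t)[i]))[j]?).getD "") 0)) := by
    rw [List.getElem?_map, List.getElem?_map, List.getElem?_eq_getElem h1]
    rfl
  rw [hrowi]
  rfl
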